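-- pv_equiv track=rewrite | github.com/afcondon/elements-of-purescript-style | purs-explain.py | split_errors
-- ===== SOURCE A (Python) =====
-- def split_errors(text: str) -> list[str]:
--     """Split compiler output into individual errors."""
--     # PureScript errors start with "[ERROR ...]" or "Error found:" or a file path with line number
--     # spago prefixes with "[n of m] Compiling ...
--     # Actual errors have this shape:
--     #   Error found:
--     #   in module Foo.Bar
--     #   at src/Foo/Bar.purs:10:5 - 10:20 (line 10, column 5 - line 10, column 20)
--     #
--     #     <context lines>
--     #
--     #     <actual error>
--
--     # Split on blank-line-separated "Error found:" blocks
--     errors = []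
--     current = []
--
--     for line in text.split("\n"):
--         if line.strip().startswith("Error found:") and current:
--             errors.append("\n".join(current))
--             current = []
--         current.append(line)
--
--     if current:
--         # Only add if it looks like an error (not just build success messages)
--         block = "\n".join(current)
--         if "Error found:" in block or "Could not match" in block or "Unknown" in block:
--             errors.append(block)
--
--     # If no structured errors found, treat the whole thing as one block
--     # (handles edge cases like purs compile output without "Error found:")
--     if not errors and ("error" in text.lower() or "could not" in text.lower()):
--         errors = [text]
--
--     return errors
-- ===== SOURCE B (Python) =====
-- def split_errors(text: str) -> list[str]:
--     """Split compiler output into individual errors (recursive block splitting)."""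
--     lines = text.split("\n")
--     blocks = _blocks(lines)
--     errors = blocks[:-1]
--     last = blocks[-1]
--     if "Error found:" in last or "Could not match" in last or "Unknown" in last:
--         errors.append(last)
--     if not errors and ("error" in text.lower() or "could not" in text.lower()):
--         errors = [text]
--     return errors
--
--
-- def _blocks(lines):
--     """Cut the line list before each "Error found:" header and join each piece.
--
--     The first line of any piece belongs to that piece (a piece may itself open
--     with an "Error found:" header), so the search for the next cut point starts
--     after it.
--     """
--     block = lines[:1]
--     rest = lines[1:]
--     while rest and not rest[0].strip().startswith("Error found:"):
--         block.append(rest.pop(0))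
--     if not rest:
--         return ["\n".join(block)]
--     return ["\n".join(block)] + _blocks(rest)
-- ===== Notes on version B (the rewrite author's own statement) =====
-- stated objective: alternative
-- what changed: B splits the line list recursively: a helper peels off one block at a time (span up to the next 'Error found:' header, then recurse on the remainder) and the top level filters only the final block; A instead runs a single forward loop with a flush-on-boundary accumulator that emits joined blocks as it goes.
import Mathlib
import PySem

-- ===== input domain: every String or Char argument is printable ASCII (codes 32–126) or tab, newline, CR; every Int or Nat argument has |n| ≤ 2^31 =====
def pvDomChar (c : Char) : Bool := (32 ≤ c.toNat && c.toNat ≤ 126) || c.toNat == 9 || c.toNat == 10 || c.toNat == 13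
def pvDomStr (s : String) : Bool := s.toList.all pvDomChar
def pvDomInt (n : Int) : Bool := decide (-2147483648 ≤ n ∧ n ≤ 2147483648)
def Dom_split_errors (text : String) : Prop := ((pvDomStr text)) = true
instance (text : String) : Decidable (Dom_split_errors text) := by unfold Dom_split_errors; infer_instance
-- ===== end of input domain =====

-- B replaces A's forward flush-on-boundary loop by a recursive splitter that peels off one
-- block at a time (span to the next "Error found:" header, recurse on the rest); alternative
-- decomposition, same cost.

-- ===== PORT A =====
-- loop body of A's forward accumulator loop: flush 'current' on an interior "Error found:" line, then append the line
def splitErrorsStepA (s : List String × List String) (line : String) : List String × List String :=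
  let s := if PySem.Str.startswith (PySem.Str.strip line) "Error found:" && !s.2.isEmpty
           then (s.1 ++ [PySem.Str.join "\n" s.2], ([] : List String))
           else s
  (s.1, s.2 ++ [line])

def split_errors (text : String) : List String :=
  let lines := (PySem.Str.split? text "\n").getD []   -- text.split("\n"); sep ≠ "" so split? is some
  let r := lines.foldl splitErrorsStepA ([], [])
  let errors := r.1
  let current := r.2
  let errors :=
    if !current.isEmpty then
      let block := PySem.Str.join "\n" current
      if PySem.Str.isIn "Error found:" block || PySem.Str.isIn "Could not match" block || PySem.Str.isIn "Unknown" block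
      then errors ++ [block] else errors
    else errors
  if errors.isEmpty && (PySem.Str.isIn "error" (PySem.Str.lower text) || PySem.Str.isIn "could not" (PySem.Str.lower text))
  then [text] else errors

-- ===== PORT B =====
-- the while loop of _blocks: split 'rest' at the first "Error found:" header (span / remainder)
def pvSpan : List String → List String × List String
  | [] => ([], [])
  | l :: ls =>
      if PySem.Str.startswith (PySem.Str.strip l) "Error found:" then ([], l :: ls)
      else
        let p := pvSpan ls
        (l :: p.1, p.2)

-- termination measure for pvBlocks (cited in its decreasing_by)
lemma pvSpan_snd_length : ∀ ls : List String, (pvSpan ls).2.length ≤ ls.length := by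
  intro ls
  induction ls with
  | nil => simp [pvSpan]
  | cons l ls ih =>
    simp only [pvSpan]
    split
    · simp
    · simpa using Nat.le_succ_of_le ih

-- _blocks: first line stays with the current block, cut at the next header, recurse
def pvBlocks (lines : List String) : List String :=
  let block := PySem.List.slice lines none (some 1)        -- lines[:1]
  let p := pvSpan (PySem.List.slice lines (some 1) none)   -- while-loop over lines[1:]
  let block := block ++ p.1
  if h : p.2.isEmpty then [PySem.Str.join "\n" block]
  else PySem.Str.join "\n" block :: pvBlocks p.2
termination_by lines.length
decreasing_by
  replace h : ¬ (pvSpan (PySem.List.slice lines (some 1) none)).2.isEmpty = true := h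
  rw [PySem.List.slice_from_one] at h ⊢
  cases lines with
  | nil => simp [pvSpan] at h
  | cons a as => simpa using Nat.lt_succ_of_le (pvSpan_snd_length as)

def split_errors_alt (text : String) : List String :=
  let lines := (PySem.Str.split? text "\n").getD []   -- text.split("\n")
  let blocks := pvBlocks lines
  let errors := blocks.dropLast                       -- blocks[:-1]
  let last := PySem.List.pyGetD blocks (-1) ""        -- blocks[-1] (blocks is never empty)
  let errors :=
    if PySem.Str.isIn "Error found:" last || PySem.Str.isIn "Could not match" last || PySem.Str.isIn "Unknown" last
    then errors ++ [last] else errors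
  if errors.isEmpty && (PySem.Str.isIn "error" (PySem.Str.lower text) || PySem.Str.isIn "could not" (PySem.Str.lower text))
  then [text] else errors

-- ===== PRECONDITION & SPEC =====
def Spec_split_errors (text : String) (out : List String) : Prop := out = split_errors_alt text
instance (text : String) (out : List String) : Decidable (Spec_split_errors text out) := by unfold Spec_split_errors; infer_instance

-- ===== CLAIM =====
def Claim_equal_split_errors : Prop := ∀ (text : String), Dom_split_errors text → Spec_split_errors text (split_errors text)

-- ===== LEMMAS AND PROOFS =====

-- the common mathematical object: the blocks of lines, each interior "Error found:" line opening a new block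
def pvChunks (acc : List String) : List String → List (List String)
  | [] => [acc]
  | l :: ls =>
      if PySem.Str.startswith (PySem.Str.strip l) "Error found:"
      then acc :: pvChunks [l] ls
      else pvChunks (acc ++ [l]) ls

lemma pv_take1 (xs : List String) : PySem.List.slice xs none (some 1) = xs.take 1 := by
  simp [pysem]

def pvTailChunks : List String → List (List String)
  | [] => []
  | b :: rs => pvChunks [b] rs

-- A's loop computes the joined init of the chunks, leaving the last chunk in 'current'
lemma foldA_chunks : ∀ (ls E C : List String), C ≠ [] →
    ∃ bs lastc, pvChunks C ls = bs ++ [lastc] ∧ lastc ≠ [] ∧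
      ls.foldl splitErrorsStepA (E, C) = (E ++ bs.map (PySem.Str.join "\n"), lastc) := by
  intro ls
  induction ls with
  | nil => intro E C h; exact ⟨[], C, rfl, h, by simp [List.foldl]⟩
  | cons l ls ih =>
    intro E C h
    by_cases hs : PySem.Str.startswith (PySem.Str.strip l) "Error found:" = true
    · obtain ⟨bs, lastc, h1, h2, h3⟩ := ih (E ++ [PySem.Str.join "\n" C]) [l] (by simp)
      refine ⟨C :: bs, lastc, ?_, h2, ?_⟩
      · simp only [pvChunks]; rw [if_pos hs, h1]; rfl
      · have hC : C.isEmpty = false := by simpa [List.isEmpty_iff] using h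
        simp only [List.foldl_cons, splitErrorsStepA, hs, hC]
        simpa using h3
    · obtain ⟨bs, lastc, h1, h2, h3⟩ := ih E (C ++ [l]) (by simp)
      refine ⟨bs, lastc, ?_, h2, ?_⟩
      · simp only [pvChunks]; rw [if_neg hs, h1]
      · simp only [List.foldl_cons, splitErrorsStepA, hs]
        simpa using h3

-- the chunk decomposition seen through pvSpan: the first chunk is acc extended by the span,
-- the remaining chunks restart at the remainder
lemma chunks_span : ∀ (ls acc : List String),
    pvChunks acc ls = (acc ++ (pvSpan ls).1) :: pvTailChunks (pvSpan ls).2 := by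
  intro ls
  induction ls with
  | nil => intro acc; simp [pvChunks, pvSpan, pvTailChunks]
  | cons l ls ih =>
    intro acc
    by_cases hs : PySem.Str.startswith (PySem.Str.strip l) "Error found:" = true
    · simp only [pvChunks, pvSpan]
      rw [if_pos hs, if_pos hs]
      simp [pvTailChunks]
    · simp only [pvChunks, pvSpan]
      rw [if_neg hs, if_neg hs, ih (acc ++ [l])]
      simp

-- B's recursive splitter computes the joined chunks
lemma blocks_chunks : ∀ (n : Nat) (ls : List String) (l : String), ls.length ≤ n →
    pvBlocks (l :: ls) = (pvChunks [l] ls).map (PySem.Str.join "\n") := by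
  intro n
  induction n with
  | zero =>
    intro ls l h
    have : ls = [] := List.eq_nil_of_length_eq_zero (Nat.le_zero.mp h)
    subst this
    simp [pvBlocks.eq_def, pvChunks, pvSpan, PySem.List.slice_from_one, pv_take1]
  | succ n ih =>
    intro ls l h
    rw [chunks_span ls [l]]
    rw [pvBlocks.eq_def, PySem.List.slice_from_one, List.tail_cons, pv_take1]
    show (if _h : (pvSpan ls).2.isEmpty = true
          then [PySem.Str.join "\n" (List.take 1 (l :: ls) ++ (pvSpan ls).1)]
          else PySem.Str.join "\n" (List.take 1 (l :: ls) ++ (pvSpan ls).1) :: pvBlocks (pvSpan ls).2)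
        = List.map (PySem.Str.join "\n") (([l] ++ (pvSpan ls).1) :: pvTailChunks (pvSpan ls).2)
    cases hp : (pvSpan ls).2 with
    | nil => simp [pvTailChunks]
    | cons b rs =>
      have hlen : rs.length ≤ n := by
        have := pvSpan_snd_length ls
        rw [hp] at this
        simp only [List.length_cons] at this
        omega
      simp [pvTailChunks, ih rs b hlen]

lemma isIn_nil_false : ∀ sub : List Char, sub ≠ [] → PySem.Chars.isIn sub ([] : List Char) = false := by
  intro sub h
  rw [PySem.Chars.isIn_eq_false_iff]
  simpa using h

theorem split_errors_spec : Claim_equal_split_errors := by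
  intro text _
  show split_errors text = split_errors_alt text
  simp only [split_errors, split_errors_alt]
  cases hl : (PySem.Str.split? text "\n").getD [] with
  | nil =>
    simp only [List.foldl_nil]
    rw [show pvBlocks [] = [PySem.Str.join "\n" []] from by
      simp [pvBlocks.eq_def, pvSpan, PySem.List.slice_from_one, pv_take1]]
    norm_num [PySem.List.pyGetD, PySem.List.pyGet?, PySem.List.pyIdx?, PySem.Str.join]
    simp [isIn_nil_false]
  | cons l ls =>
    obtain ⟨bs, lastc, hch, hne, hfold⟩ := foldA_chunks ls [] [l] (by simp)
    -- A's loop over l :: ls : the first line never flushes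
    have hstep : splitErrorsStepA ([], []) l = ([], [l]) := by
      simp [splitErrorsStepA]
    rw [List.foldl_cons, hstep, hfold]
    -- B's recursive splitter
    rw [blocks_chunks ls.length ls l (le_refl _), hch]
    rw [List.map_append, List.map_singleton, List.dropLast_concat,
        PySem.List.pyGetD_neg_one_append_singleton]
    have hcur : lastc.isEmpty = false := by simpa [List.isEmpty_iff] using hne
    simp only [hcur, Bool.not_false, if_true, List.nil_append]

-- ===== VERDICT =====
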